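-- pv_equiv track=rewrite | github.com/mariosilvarr03/water-sort-ai | project.py | _contiguous_top_block
-- ===== SOURCE A (Python) =====
-- from typing import List, Tuple, Iterable, Optional, Callable
--
-- Tube = Tuple[str, ...]          # bottom -> top
--
-- def _contiguous_top_block(tube: Tube) -> int:
--     """Return length of contiguous block of same-color pieces at top."""
--     if not tube:
--         return 0
--     top = tube[-1]
--     count = 0
--     for c in reversed(tube):
--         if c == top:
--             count += 1
--         else:
--             break
--     return count
-- ===== SOURCE B (Python) =====
-- def _contiguous_top_block(tube):
--     """Return length of contiguous block of same-color pieces at top."""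
--     runs = []  # run-length decomposition of the whole tube, bottom -> top
--     for c in tube:
--         if runs and runs[-1][0] == c:
--             runs[-1] = (c, runs[-1][1] + 1)
--         else:
--             runs.append((c, 1))
--     return runs[-1][1] if runs else 0
-- ===== Notes on version B (the rewrite author's own statement) =====
-- stated objective: alternative
-- what changed: Replaces the reverse early-exit scan with a single forward pass that builds the full run-length decomposition of the tube and returns the length of its last run.
import Mathlib
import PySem

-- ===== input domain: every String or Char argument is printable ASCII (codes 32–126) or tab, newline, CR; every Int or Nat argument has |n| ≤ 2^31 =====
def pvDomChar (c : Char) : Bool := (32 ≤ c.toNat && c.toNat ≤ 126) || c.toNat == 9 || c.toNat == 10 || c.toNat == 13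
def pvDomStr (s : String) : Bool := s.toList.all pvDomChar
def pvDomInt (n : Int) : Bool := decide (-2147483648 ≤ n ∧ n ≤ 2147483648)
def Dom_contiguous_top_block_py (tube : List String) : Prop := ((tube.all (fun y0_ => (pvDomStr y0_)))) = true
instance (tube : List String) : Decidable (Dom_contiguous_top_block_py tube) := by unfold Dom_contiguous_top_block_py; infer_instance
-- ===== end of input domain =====

-- B replaces A's reverse early-exit scan with a forward full-tube run-length decomposition that returns the last run's length (alternative decomposition).


-- ===== PORT A =====
-- 'for c in reversed(tube): if c == top: count += 1 else: break' — early-exit counting loop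
def pvALoop (top : String) : List String → Int
  | [] => 0
  | c :: rest => if c = top then 1 + pvALoop top rest else 0

def contiguous_top_block_py (tube : List String) : Int :=
  if tube = [] then 0
  else
    let top := (PySem.List.pyGet? tube (-1)).getD ""   -- tube[-1]; in range since tube ≠ []
    pvALoop top tube.reverse

-- ===== PORT B =====
-- one step of the forward run-length pass: extend the last run or start a new one
def pvStep (acc : List (String × Int)) (c : String) : List (String × Int) :=
  match acc.getLast? with
  | some (k, n) => if k = c then acc.dropLast ++ [(k, n + 1)] else acc ++ [(c, 1)]
  | none => [(c, 1)]

def contiguous_top_block_py_alt (tube : List String) : Int :=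
  match (tube.foldl pvStep []).getLast? with
  | some (_, n) => n
  | none => 0

-- ===== PRECONDITION & SPEC =====
def Spec_contiguous_top_block_py (tube : List String) (out : Int) : Prop := out = contiguous_top_block_py_alt tube
instance (tube : List String) (out : Int) : Decidable (Spec_contiguous_top_block_py tube out) := by unfold Spec_contiguous_top_block_py; infer_instance

-- ===== CLAIM (what is proved, stated in full; the proofs are below) =====
def Claim_equal_contiguous_top_block_py : Prop := ∀ (tube : List String), Dom_contiguous_top_block_py tube → Spec_contiguous_top_block_py tube (contiguous_top_block_py tube)

-- ===== LEMMAS AND PROOFS =====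

-- The runs built by B's fold end with the run of the tube's last element,
-- whose length is exactly what A's reverse counting loop computes.
theorem pvRuns_spec (xs : List String) (hne : xs ≠ []) :
    ∃ rest n, xs.foldl pvStep [] = rest ++ [(xs.getLast hne, n)] ∧
      n = pvALoop (xs.getLast hne) xs.reverse := by
  induction xs using List.reverseRecOn with
  | nil => exact absurd rfl hne
  | append_singleton xs c ih =>
    rw [List.foldl_append]
    by_cases hxs : xs = []
    · subst hxs
      exact ⟨[], 1, by simp [pvStep, pvALoop]⟩
    · obtain ⟨rest, n, hfold, hn⟩ := ih hxs
      have hlast : (xs ++ [c]).getLast (by simp) = c := by simp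
      have hxrev : xs.reverse = xs.getLast hxs :: xs.dropLast.reverse := by
        conv_lhs => rw [← List.dropLast_append_getLast hxs]
        simp
      by_cases hk : xs.getLast hxs = c
      · refine ⟨rest, n + 1, ?_, ?_⟩
        · simp [hfold, pvStep, hlast, hk]
        · rw [hlast, List.reverse_append, List.reverse_singleton]
          simp only [List.singleton_append]
          rw [← hk, hn]
          simp [pvALoop]
          omega
      · refine ⟨rest ++ [(xs.getLast hxs, n)], 1, ?_, ?_⟩
        · simp [hfold, pvStep, hlast, hk]
        · rw [hlast, List.reverse_append, List.reverse_singleton]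
          simp only [List.singleton_append]
          simp [pvALoop, hxrev, hk]

-- ===== VERDICT (by name: the statement is the Claim_ definition above) =====
theorem contiguous_top_block_py_spec : Claim_equal_contiguous_top_block_py := by
  intro tube _
  unfold Spec_contiguous_top_block_py contiguous_top_block_py contiguous_top_block_py_alt
  by_cases h : tube = []
  · simp [h]
  · obtain ⟨rest, n, hfold, hn⟩ := pvRuns_spec tube h
    rw [if_neg h, hfold]
    simp only [List.getLast?_append, List.getLast?_singleton, Option.or]
    have htop : (PySem.List.pyGet? tube (-1)).getD "" = tube.getLast h := by
      rw [PySem.List.pyGet?_neg_one, List.getLast?_eq_getLast_of_ne_nil h]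
      rfl
    rw [htop, hn]
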